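-- pv_equiv track=rewrite | github.com/cutehammond772/problem-solving-archive | 백준/Gold/23328. 마을 구하기/마을 구하기.py | solve
-- ===== SOURCE A (Python) =====
-- def solve(N, bomb, S):
--   shield = bomb.lower()
--   bombs, shields = 0, 0
--   result = []
--
--   for i in range(N):
--     if S[i] == bomb:
--       bombs += 1
--
--     elif S[i] == shield:
--       shields += 1
--
--     else:
--       result.append(S[i])
--
--   # Case 1. 쉴드가 1개 이하
--   if shields <= 1:
--     bomb_string = bomb * bombs
--     shield_string = shield * shields
--
--     result.sort()
--     result = "".join(result)
--
--     return min(
--       (bomb_string + shield_string) + result,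
--       result + (shield_string + bomb_string)
--     )
--
--   # Case 2. 쉴드가 2개 이상
--   else:
--     candidate = []
--
--     # aAAAAaaaa...
--     c1 = shield + (bomb * bombs) + (shield * (shields - 1))
--     r1 = result[:] + [c1]
--
--     r1.sort()
--     candidate.append("".join(r1))
--
--     # AAAaBCDEF...
--     c2 = (bomb * bombs) + shield
--     r2 = result[:] + ([shield] * (shields - 1))
--
--     r2.sort()
--     candidate.append(c2 + "".join(r2))
--
--     return min(candidate)
-- ===== SOURCE B (Python) =====
-- def solve(N, bomb, S):
--     # Counting sort over the ASCII alphabet instead of comparison-sorting the leftover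
--     # characters; the long candidate strings of case 2 are placed by their first character.
--     shield = bomb.lower()
--     bombs = shields = 0
--     counts = {}
--     for ch in (S[:N] if N > 0 else ""):
--         if ch == bomb:
--             bombs += 1
--         elif ch == shield:
--             shields += 1
--         else:
--             counts[ch] = counts.get(ch, 0) + 1
--
--     def run(lo, hi):
--         # leftover characters with lo <= code < hi, ascending with multiplicity
--         return "".join(chr(c) * counts.get(chr(c), 0) for c in range(lo, hi))
--
--     if shields <= 1:
--         rest = run(0, 128)
--         x = bomb * bombs + shield * shields + rest
--         y = rest + shield * shields + bomb * bombs
--         return x if x <= y else y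
--     else:
--         sc = ord(shield)
--         low, high = run(0, sc), run(sc + 1, 128)
--         c1 = low + shield + bomb * bombs + shield * (shields - 1) + high
--         c2 = bomb * bombs + shield + low + shield * (shields - 1) + high
--         return c1 if c1 <= c2 else c2
-- ===== Notes on version B (the rewrite author's own statement) =====
-- stated objective: alternative
-- what changed: Replaces the two comparison sorts of the leftover characters by a single counting pass (a char->count dict) emitted in ASCII code order, and places case 2's long candidate string c1 directly at its split point (between codes below and above the shield character) instead of sorting it into the list.
import Mathlib
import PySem

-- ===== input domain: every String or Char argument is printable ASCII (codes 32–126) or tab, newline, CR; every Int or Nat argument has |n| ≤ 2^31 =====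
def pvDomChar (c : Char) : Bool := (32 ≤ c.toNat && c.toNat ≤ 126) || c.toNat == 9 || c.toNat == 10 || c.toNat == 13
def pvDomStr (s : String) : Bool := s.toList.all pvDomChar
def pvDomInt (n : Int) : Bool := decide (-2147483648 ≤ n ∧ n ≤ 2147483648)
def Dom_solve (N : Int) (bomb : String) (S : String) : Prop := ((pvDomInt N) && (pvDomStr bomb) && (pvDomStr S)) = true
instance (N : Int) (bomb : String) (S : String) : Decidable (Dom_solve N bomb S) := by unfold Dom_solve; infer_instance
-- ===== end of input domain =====

-- B replaces A's two comparison sorts by one counting pass over a char->count dict emitted in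
-- ASCII code order; the claim is about the return value (neither A nor B mutates an argument).

-- ===== PORT A =====
-- Python strings are modelled as List Char; S[i] is one Char c, compared as the 1-char string [c].
-- The body of A's `for i in range(N)` loop, as a named helper.
def solveStep (bl sl : List Char) (st : Int × Int × List (List Char)) (c : Char) : Int × Int × List (List Char) :=
  if [c] = bl then (st.1 + 1, st.2.1, st.2.2)
  else if [c] = sl then (st.1, st.2.1 + 1, st.2.2)
  else (st.1, st.2.1, st.2.2 ++ [[c]])

def solve (N : Int) (bomb : String) (S : String) : String :=
  let shield := PySem.Str.lower bomb
  let st := (PySem.List.pyRange 0 N 1).foldl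
    (fun acc i => solveStep bomb.toList shield.toList acc (PySem.List.pyGetD S.toList i ' '))  -- S[i]; in range under Pre_solve
    (0, 0, ([] : List (List Char)))
  let bombs := st.1
  let shields := st.2.1
  let result := st.2.2
  if shields ≤ 1 then
    let bombString := PySem.List.pyRepeat bomb.toList bombs
    let shieldString := PySem.List.pyRepeat shield.toList shields
    let r := PySem.Chars.join [] (PySem.List.sorted result (fun x => x) false)  -- result.sort(); "".join(result)
    let a := (bombString ++ shieldString) ++ r
    let b := r ++ (shieldString ++ bombString)
    String.ofList (if a ≤ b then a else b)          -- min of the two strings (first on a tie)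
  else
    let c1 := shield.toList ++ PySem.List.pyRepeat bomb.toList bombs ++ PySem.List.pyRepeat shield.toList (shields - 1)
    let r1 := result ++ [c1]
    let cand1 := PySem.Chars.join [] (PySem.List.sorted r1 (fun x => x) false)
    let c2 := PySem.List.pyRepeat bomb.toList bombs ++ shield.toList
    let r2 := result ++ PySem.List.pyRepeat [shield.toList] (shields - 1)
    let cand2 := c2 ++ PySem.Chars.join [] (PySem.List.sorted r2 (fun x => x) false)
    String.ofList (if cand1 ≤ cand2 then cand1 else cand2)   -- min(candidate) over the two candidates

-- ===== PORT B =====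
-- The body of B's counting loop, as a named helper.
def altStep (bl sl : List Char) (st : Int × Int × PySem.Dict Char Int) (c : Char) : Int × Int × PySem.Dict Char Int :=
  if [c] = bl then (st.1 + 1, st.2.1, st.2.2)
  else if [c] = sl then (st.1, st.2.1 + 1, st.2.2)
  else (st.1, st.2.1, st.2.2.modify c 0 (· + 1))   -- counts[ch] = counts.get(ch, 0) + 1

def solve_alt (N : Int) (bomb : String) (S : String) : String :=
  let bl := bomb.toList
  let shield := PySem.Chars.lower bl
  let pfx := if 0 < N then PySem.List.slice S.toList none (some N) else []   -- S[:N] if N > 0 else ""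
  let st := pfx.foldl (altStep bl shield) (0, 0, (PySem.Dict.empty : PySem.Dict Char Int))
  let bombs := st.1
  let shields := st.2.1
  let counts := st.2.2
  -- run(lo, hi) = "".join(chr(c) * counts.get(chr(c), 0) for c in range(lo, hi))
  let run := fun (lo hi : Int) =>
    ((PySem.List.pyRange lo hi 1).map
      (fun k => PySem.List.pyRepeat [Char.ofNat k.toNat] (counts.getD (Char.ofNat k.toNat) 0))).flatten
  if shields ≤ 1 then
    let rest := run 0 128
    let x := PySem.List.pyRepeat bl bombs ++ PySem.List.pyRepeat shield shields ++ rest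
    let y := rest ++ PySem.List.pyRepeat shield shields ++ PySem.List.pyRepeat bl bombs
    String.ofList (if x ≤ y then x else y)
  else
    let sc : Int := ((shield.headD ' ').toNat : Int)   -- ord(shield); shield is one char whenever shields ≥ 2
    let low := run 0 sc
    let high := run (sc + 1) 128
    let c1 := low ++ shield ++ PySem.List.pyRepeat bl bombs ++ PySem.List.pyRepeat shield (shields - 1) ++ high
    let c2 := PySem.List.pyRepeat bl bombs ++ shield ++ low ++ PySem.List.pyRepeat shield (shields - 1) ++ high
    String.ofList (if c1 ≤ c2 then c1 else c2)

-- ===== PRECONDITION & SPEC =====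
-- A indexes S[i] for i in range(N): it raises IndexError exactly when N > len(S).
def Pre_solve (N : Int) (bomb : String) (S : String) : Prop := N ≤ PySem.Str.len S
instance (N : Int) (bomb : String) (S : String) : Decidable (Pre_solve N bomb S) := by unfold Pre_solve; infer_instance
def pvWitness_solve : Int × String × String := (6, "A", "bAcaab")

def Spec_solve (N : Int) (bomb : String) (S : String) (out : String) : Prop := out = solve_alt N bomb S
instance (N : Int) (bomb : String) (S : String) (out : String) : Decidable (Spec_solve N bomb S out) := by unfold Spec_solve; infer_instance

-- ===== CLAIM (what is proved, stated in full; the proofs are below) =====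
def Claim_equal_solve : Prop := ∀ (N : Int) (bomb : String) (S : String), Dom_solve N bomb S → Pre_solve N bomb S → Spec_solve N bomb S (solve N bomb S)
-- ===== LEMMAS AND PROOFS =====

-- "".join is list concatenation
theorem pvJoinNil (ps : List (List Char)) : PySem.Chars.join [] ps = ps.flatten := by
  induction ps with
  | nil => rfl
  | cons p t ih =>
    cases t with
    | nil => simp [PySem.Chars.join, List.intercalate, List.intersperse]
    | cons q r => rw [PySem.Chars.join_cons_cons]; simp_all

theorem pvFlattenSingles (l : List Char) : (l.map (fun c => [c])).flatten = l := by
  induction l <;> simp_all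

theorem pvFlattenRep (m : Nat) (c : Char) : (List.replicate m ([c] : List Char)).flatten = List.replicate m c := by
  induction m <;> simp_all

-- Char code arithmetic (all codes below 128)
theorem pvChrToNat (k : Nat) (h : k < 128) : (Char.ofNat k).toNat = k := by
  rw [Char.toNat_ofNat, if_pos]; exact Or.inl (by omega)

theorem pvChrLt {a k : Nat} (ha : a < 128) (hk : k < 128) (h : a < k) : Char.ofNat a < Char.ofNat k := by
  have h' : (Char.ofNat a).toNat < (Char.ofNat k).toNat := by
    rw [pvChrToNat a ha, pvChrToNat k hk]; exact h
  exact Char.lt_def.mpr (UInt32.lt_iff_toNat_lt.mpr h')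

theorem pvChrLe {a k : Nat} (ha : a < 128) (hk : k < 128) (h : a ≤ k) : Char.ofNat a ≤ Char.ofNat k := by
  rcases Nat.lt_or_ge a k with h' | h'
  · exact le_of_lt (pvChrLt ha hk h')
  · have he : a = k := by omega
    subst he; exact le_refl _

theorem pvChrNe {a k : Nat} (ha : a < 128) (hk : k < 128) (h : a ≠ k) : Char.ofNat a ≠ Char.ofNat k := by
  intro he
  have h2 := congrArg Char.toNat he
  rw [pvChrToNat a ha, pvChrToNat k hk] at h2
  exact h h2

-- lexicographic comparison with singleton strings
theorem pvSingLe {a b : Char} (h : a ≤ b) : ([a] : List Char) ≤ [b] := by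
  rcases lt_or_eq_of_le h with h' | h'
  · exact le_of_lt (List.Lex.rel h')
  · subst h'; exact le_refl _

theorem pvLexLt1 {a b : Char} (t : List Char) (h : a < b) : ([a] : List Char) < b :: t := List.Lex.rel h

theorem pvLexLt2 {a b : Char} (t : List Char) (h : a < b) : (a :: t : List Char) < [b] := List.Lex.rel h

-- the counting-sort image: characters of codes a..a+n-1, each repeated cnt k times
def pvG (cnt : Nat → Nat) (a n : Nat) : List Char :=
  (List.range' a n).flatMap (fun k => List.replicate (cnt k) (Char.ofNat k))

def pvLG (cnt : Nat → Nat) (a n : Nat) : List (List Char) :=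
  (List.range' a n).flatMap (fun k => List.replicate (cnt k) [Char.ofNat k])

theorem pvLG_eq (cnt : Nat → Nat) (a n : Nat) : pvLG cnt a n = (pvG cnt a n).map (fun c => [c]) := by
  simp [pvLG, pvG, List.map_flatMap, List.map_replicate]

theorem pvG_append (cnt : Nat → Nat) (a m n : Nat) :
    pvG cnt a (m + n) = pvG cnt a m ++ pvG cnt (a + m) n := by
  unfold pvG
  rw [← List.range'_append (s := a) (m := m) (n := n) (step := 1), List.flatMap_append]
  simp

theorem pvG_one (cnt : Nat → Nat) (a : Nat) : pvG cnt a 1 = List.replicate (cnt a) (Char.ofNat a) := by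
  simp [pvG]

theorem pvLG_append (cnt : Nat → Nat) (a m n : Nat) :
    pvLG cnt a (m + n) = pvLG cnt a m ++ pvLG cnt (a + m) n := by
  rw [pvLG_eq, pvLG_eq, pvLG_eq, pvG_append, List.map_append]

theorem pvLG_one (cnt : Nat → Nat) (a : Nat) : pvLG cnt a 1 = List.replicate (cnt a) ([Char.ofNat a] : List Char) := by
  simp [pvLG]

theorem pvMemG {x : Char} {cnt : Nat → Nat} {a n : Nat} (h : x ∈ pvG cnt a n) :
    ∃ k, a ≤ k ∧ k < a + n ∧ x = Char.ofNat k := by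
  unfold pvG at h
  rw [List.mem_flatMap] at h
  obtain ⟨k, hk, hx⟩ := h
  rw [List.mem_range'_1] at hk
  exact ⟨k, hk.1, hk.2, List.eq_of_mem_replicate hx⟩

theorem pvMemLG {x : List Char} {cnt : Nat → Nat} {a n : Nat} (h : x ∈ pvLG cnt a n) :
    ∃ k, a ≤ k ∧ k < a + n ∧ x = [Char.ofNat k] := by
  rw [pvLG_eq, List.mem_map] at h
  obtain ⟨c, hc, rfl⟩ := h
  obtain ⟨k, h1, h2, rfl⟩ := pvMemG hc
  exact ⟨k, h1, h2, rfl⟩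

theorem pvG_congr {cnt cnt' : Nat → Nat} {a n : Nat} (h : ∀ k, a ≤ k → k < a + n → cnt k = cnt' k) :
    pvG cnt a n = pvG cnt' a n := by
  unfold pvG
  apply List.flatMap_congr
  intro k hk
  rw [List.mem_range'_1] at hk
  rw [h k hk.1 hk.2]

theorem pvLG_congr {cnt cnt' : Nat → Nat} {a n : Nat} (h : ∀ k, a ≤ k → k < a + n → cnt k = cnt' k) :
    pvLG cnt a n = pvLG cnt' a n := by
  rw [pvLG_eq, pvLG_eq, pvG_congr h]

theorem pvPairwiseG (cnt : Nat → Nat) : ∀ (n a : Nat), a + n ≤ 128 → (pvG cnt a n).Pairwise (· ≤ ·) := by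
  intro n
  induction n with
  | zero => intro a _; simp [pvG]
  | succ m ih =>
    intro a h
    have he : pvG cnt a (m + 1) = pvG cnt a 1 ++ pvG cnt (a + 1) m := by
      have h1 := pvG_append cnt a 1 m
      rw [Nat.add_comm 1 m] at h1
      exact h1
    rw [he, List.pairwise_append]
    refine ⟨?_, ih (a + 1) (by omega), ?_⟩
    · rw [pvG_one]; exact List.pairwise_replicate.mpr (Or.inr (le_refl _))
    · intro x hx y hy
      obtain ⟨k1, hk1a, hk1b, rfl⟩ := pvMemG hx
      obtain ⟨k2, hk2a, hk2b, rfl⟩ := pvMemG hy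
      exact pvChrLe (by omega) (by omega) (by omega)

theorem pvPairwiseLG (cnt : Nat → Nat) (a n : Nat) (h : a + n ≤ 128) :
    (pvLG cnt a n).Pairwise (· ≤ ·) := by
  rw [pvLG_eq, List.pairwise_map]
  exact (pvPairwiseG cnt n a h).imp (fun hab => pvSingLe hab)

theorem pvPermG : ∀ (n a : Nat) (rs : List Char), a + n ≤ 128 →
    (∀ c ∈ rs, a ≤ c.toNat ∧ c.toNat < a + n) →
    rs.Perm (pvG (fun k => rs.count (Char.ofNat k)) a n) := by
  intro n
  induction n with
  | zero =>
    intro a rs _ h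
    have he : rs = [] := by
      cases rs with
      | nil => rfl
      | cons c t => exact absurd (h c (by simp)) (by omega)
    subst he; simp [pvG]
  | succ m ih =>
    intro a rs hn h
    have hsplit := (List.filter_append_perm (fun c => c == Char.ofNat a) rs).symm
    have hfb : rs.filter (fun c => c == Char.ofNat a) = List.replicate (rs.count (Char.ofNat a)) (Char.ofNat a) :=
      List.filter_beq _
    have hG : pvG (fun k => rs.count (Char.ofNat k)) a (m + 1)
        = List.replicate (rs.count (Char.ofNat a)) (Char.ofNat a) ++ pvG (fun k => rs.count (Char.ofNat k)) (a + 1) m := by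
      have h1 := pvG_append (fun k => rs.count (Char.ofNat k)) a 1 m
      rw [Nat.add_comm 1 m] at h1
      rw [h1, pvG_one]
    set rs' := rs.filter (fun c => !(c == Char.ofNat a)) with hrs'
    have hmem' : ∀ c ∈ rs', a + 1 ≤ c.toNat ∧ c.toNat < (a + 1) + m := by
      intro c hc
      have hcc := List.mem_of_mem_filter hc
      have hb := List.of_mem_filter hc
      have hne : c ≠ Char.ofNat a := by simpa using hb
      have hr := h c hcc
      have hta : c.toNat ≠ a := by
        intro hee; apply hne; rw [← hee, Char.ofNat_toNat]
      omega
    have hcount : pvG (fun k => rs.count (Char.ofNat k)) (a + 1) m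
        = pvG (fun k => rs'.count (Char.ofNat k)) (a + 1) m := by
      apply pvG_congr
      intro k hk1 hk2
      rw [hrs', List.count_filter]
      have hne : Char.ofNat k ≠ Char.ofNat a := pvChrNe (by omega) (by omega) (by omega)
      simp [hne]
    have hperm2 : rs'.Perm (pvG (fun k => rs'.count (Char.ofNat k)) (a + 1) m) :=
      ih (a + 1) rs' (by omega) hmem'
    have hstep : rs.Perm (List.replicate (rs.count (Char.ofNat a)) (Char.ofNat a) ++ rs') := by
      rw [← hfb]; exact hsplit
    refine hstep.trans ?_
    rw [hG, hcount]
    exact List.Perm.append_left _ hperm2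

-- PySem.List.sorted is insertion sort on decide(<); the ambient List-instances and the
-- LinearOrder instances of the order lemmas decide the same lexicographic order
theorem pvSortedBridge (xs : List (List Char)) :
    @PySem.List.sorted (List Char) (List Char) List.instLT (fun a b => a.decidableLT b) xs (fun x => x) false
      = @PySem.List.sorted (List Char) (List Char)
          (@Preorder.toLT _ (@PartialOrder.toPreorder _ (@LinearOrder.toPartialOrder _ List.instLinearOrder)))
          (@LinearOrder.toDecidableLT _ List.instLinearOrder) xs (fun x => x) false := by
  rw [PySem.List.sorted_eq_foldl_insertBy,
      @PySem.List.sorted_eq_foldl_insertBy (List Char) (List Char)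
        (@Preorder.toLT _ (@PartialOrder.toPreorder _ (@LinearOrder.toPartialOrder _ List.instLinearOrder)))
        (@LinearOrder.toDecidableLT _ List.instLinearOrder) xs (fun x => x)]
  congr 1
  funext acc x
  congr 1
  funext a b
  rw [decide_eq_decide]

-- sorting the leftover singleton strings IS the counting-sort image
theorem pvSorted1 (rs : List Char) (h : ∀ c ∈ rs, c.toNat < 128) :
    PySem.List.sorted (rs.map (fun c => [c])) (fun x => x) false
      = pvLG (fun k => rs.count (Char.ofNat k)) 0 128 := by
  have hperm : (pvLG (fun k => rs.count (Char.ofNat k)) 0 128).Perm (rs.map (fun c => [c])) := by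
    rw [pvLG_eq]
    exact (List.Perm.map _ (pvPermG 128 0 rs (by omega)
      (fun c hc => ⟨Nat.zero_le _, by simpa using h c hc⟩))).symm
  rw [pvSortedBridge]
  exact PySem.List.sorted_id_eq_of_perm_of_pairwise _ _ hperm (pvPairwiseLG _ 0 128 (by omega))

-- case 2, candidate 1: the long string s0 :: rest sorts in between the codes below and above s0
theorem pvSorted2 (rs : List Char) (s0 : Char) (rest : List Char)
    (h : ∀ c ∈ rs, c.toNat < 128) (h0 : s0.toNat < 128) (hcnt : rs.count s0 = 0) :
    PySem.List.sorted (rs.map (fun c => [c]) ++ [s0 :: rest]) (fun x => x) false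
      = pvLG (fun k => rs.count (Char.ofNat k)) 0 s0.toNat
        ++ (s0 :: rest) :: pvLG (fun k => rs.count (Char.ofNat k)) (s0.toNat + 1) (127 - s0.toNat) := by
  have hsplitG : pvLG (fun k => rs.count (Char.ofNat k)) 0 128
      = pvLG (fun k => rs.count (Char.ofNat k)) 0 s0.toNat
        ++ pvLG (fun k => rs.count (Char.ofNat k)) (s0.toNat + 1) (127 - s0.toNat) := by
    rw [show (128 : Nat) = s0.toNat + (1 + (127 - s0.toNat)) by omega, pvLG_append, pvLG_append]
    rw [pvLG_one]
    have hz : rs.count (Char.ofNat (0 + s0.toNat)) = 0 := by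
      rw [Nat.zero_add, Char.ofNat_toNat]; exact hcnt
    rw [hz]
    simp
  have hperm : (pvLG (fun k => rs.count (Char.ofNat k)) 0 s0.toNat
      ++ (s0 :: rest) :: pvLG (fun k => rs.count (Char.ofNat k)) (s0.toNat + 1) (127 - s0.toNat)).Perm
      (rs.map (fun c => [c]) ++ [s0 :: rest]) := by
    refine List.Perm.trans List.perm_middle ?_
    refine List.Perm.trans (List.Perm.cons _ (show (pvLG (fun k => rs.count (Char.ofNat k)) 0 s0.toNat
      ++ pvLG (fun k => rs.count (Char.ofNat k)) (s0.toNat + 1) (127 - s0.toNat)).Perm (rs.map (fun c => [c])) by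
        rw [← hsplitG, pvLG_eq]
        exact (List.Perm.map _ (pvPermG 128 0 rs (by omega)
          (fun c hc => ⟨Nat.zero_le _, by simpa using h c hc⟩))).symm)) ?_
    exact (List.perm_append_singleton _ _).symm
  have hpair : (pvLG (fun k => rs.count (Char.ofNat k)) 0 s0.toNat
      ++ (s0 :: rest) :: pvLG (fun k => rs.count (Char.ofNat k)) (s0.toNat + 1) (127 - s0.toNat)).Pairwise (· ≤ ·) := by
    rw [List.pairwise_append]
    refine ⟨pvPairwiseLG _ 0 s0.toNat (by omega), ?_, ?_⟩
    · rw [List.pairwise_cons]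
      refine ⟨?_, pvPairwiseLG _ (s0.toNat + 1) (127 - s0.toNat) (by omega)⟩
      intro y hy
      obtain ⟨k, hk1, hk2, rfl⟩ := pvMemLG hy
      have hlt : s0 < Char.ofNat k := by
        conv_lhs => rw [← Char.ofNat_toNat s0]
        exact pvChrLt h0 (by omega) (by omega)
      exact le_of_lt (pvLexLt2 rest hlt)
    · intro x hx y hy
      obtain ⟨k, hk1, hk2, rfl⟩ := pvMemLG hx
      rcases List.mem_cons.mp hy with hy1 | hy2
      · subst hy1
        have hlt : Char.ofNat k < s0 := by
          conv_rhs => rw [← Char.ofNat_toNat s0]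
          exact pvChrLt (by omega) h0 (by omega)
        exact le_of_lt (pvLexLt1 rest hlt)
      · obtain ⟨k2, hk2a, hk2b, rfl⟩ := pvMemLG hy2
        exact pvSingLe (pvChrLe (by omega) (by omega) (by omega))
  rw [pvSortedBridge]
  exact PySem.List.sorted_id_eq_of_perm_of_pairwise _ _ hperm hpair

-- case 2, candidate 2: the extra copies of s0 sort in between as well
theorem pvSorted3 (rs : List Char) (s0 : Char) (m : Nat)
    (h : ∀ c ∈ rs, c.toNat < 128) (h0 : s0.toNat < 128) (hcnt : rs.count s0 = 0) :
    PySem.List.sorted (rs.map (fun c => [c]) ++ List.replicate m [s0]) (fun x => x) false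
      = pvLG (fun k => rs.count (Char.ofNat k)) 0 s0.toNat
        ++ List.replicate m ([s0] : List Char)
        ++ pvLG (fun k => rs.count (Char.ofNat k)) (s0.toNat + 1) (127 - s0.toNat) := by
  have harg : rs.map (fun c => [c]) ++ List.replicate m ([s0] : List Char)
      = (rs ++ List.replicate m s0).map (fun c => [c]) := by
    rw [List.map_append, List.map_replicate]
  rw [harg]
  have h' : ∀ c ∈ rs ++ List.replicate m s0, c.toNat < 128 := by
    intro c hc
    rcases List.mem_append.mp hc with hc | hc
    · exact h c hc
    · rw [List.eq_of_mem_replicate hc]; exact h0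
  have hca : ∀ k, k < 128 → k ≠ s0.toNat →
      (rs ++ List.replicate m s0).count (Char.ofNat k) = rs.count (Char.ofNat k) := by
    intro k hk hne
    rw [List.count_append, List.count_replicate]
    have hne' : Char.ofNat k ≠ s0 := by
      intro he; apply hne; rw [← he, pvChrToNat k hk]
    simp [Ne.symm hne']
  have hmid : (rs ++ List.replicate m s0).count s0 = m := by
    rw [List.count_append, hcnt, List.count_replicate]
    simp
  have hl : pvLG (fun k => (rs ++ List.replicate m s0).count (Char.ofNat k)) 0 s0.toNat
      = pvLG (fun k => rs.count (Char.ofNat k)) 0 s0.toNat :=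
    pvLG_congr (fun k hk1 hk2 => hca k (by omega) (by omega))
  have hh : pvLG (fun k => (rs ++ List.replicate m s0).count (Char.ofNat k)) (s0.toNat + 1) (127 - s0.toNat)
      = pvLG (fun k => rs.count (Char.ofNat k)) (s0.toNat + 1) (127 - s0.toNat) :=
    pvLG_congr (fun k hk1 hk2 => hca k (by omega) (by omega))
  rw [pvSorted1 _ h',
      show (128 : Nat) = s0.toNat + (1 + (127 - s0.toNat)) by omega,
      pvLG_append, pvLG_append, pvLG_one]
  simp only [Nat.zero_add, Char.ofNat_toNat]
  rw [hmid, hl, hh]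
  simp [List.append_assoc]

-- A's classification loop, componentwise
theorem pvFoldA (bl sl : List Char) (cs : List Char) :
    cs.foldl (solveStep bl sl) (0, 0, ([] : List (List Char)))
    = ((cs.countP (fun c => decide ([c] = bl)) : Int),
       (cs.countP (fun c => decide (¬([c] = bl) ∧ [c] = sl)) : Int),
       (cs.filter (fun c => decide (¬([c] = bl) ∧ ¬([c] = sl)))).map (fun c => [c])) := by
  have hshape : ∀ (st : Int × Int × List (List Char)), ∀ c ∈ cs, solveStep bl sl st c =
      ((fun (a : Int) (c : Char) => if [c] = bl then a + 1 else a) st.1 c,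
       (fun (p : Int × List (List Char)) (c : Char) =>
         ((fun (b : Int) (c : Char) => if ¬([c] = bl) ∧ [c] = sl then b + 1 else b) p.1 c,
          (fun (r : List (List Char)) (c : Char) => if ¬([c] = bl) ∧ ¬([c] = sl) then r ++ [[c]] else r) p.2 c)) st.2 c) := by
    intro st c _
    simp only [solveStep]
    split_ifs <;> first | rfl | simp_all
  rw [PySem.List.foldl_congr_mem cs _ _ _ hshape]
  rw [PySem.List.foldl_prod_mk (f := fun (a : Int) (c : Char) => if [c] = bl then a + 1 else a)
      (g := fun (p : Int × List (List Char)) (c : Char) =>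
        ((fun (b : Int) (c : Char) => if ¬([c] = bl) ∧ [c] = sl then b + 1 else b) p.1 c,
         (fun (r : List (List Char)) (c : Char) => if ¬([c] = bl) ∧ ¬([c] = sl) then r ++ [[c]] else r) p.2 c))]
  rw [PySem.List.foldl_prod_mk (f := fun (b : Int) (c : Char) => if ¬([c] = bl) ∧ [c] = sl then b + 1 else b)
      (g := fun (r : List (List Char)) (c : Char) => if ¬([c] = bl) ∧ ¬([c] = sl) then r ++ [[c]] else r)]
  rw [PySem.List.foldl_ite_add_one (p := fun c => [c] = bl)]
  rw [PySem.List.foldl_ite_add_one (p := fun c => ¬([c] = bl) ∧ [c] = sl)]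
  rw [PySem.List.foldl_append_ite (p := fun c => ¬([c] = bl) ∧ ¬([c] = sl)) (f := fun c => [c])]
  simp

-- B's counting loop, componentwise
theorem pvFoldB (bl sl : List Char) (cs : List Char) :
    cs.foldl (altStep bl sl) (0, 0, (PySem.Dict.empty : PySem.Dict Char Int))
    = ((cs.countP (fun c => decide ([c] = bl)) : Int),
       (cs.countP (fun c => decide (¬([c] = bl) ∧ [c] = sl)) : Int),
       (cs.filter (fun c => decide (¬([c] = bl) ∧ ¬([c] = sl)))).foldl
         (fun d c => d.modify c 0 (· + 1)) PySem.Dict.empty) := by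
  have hshape : ∀ (st : Int × Int × PySem.Dict Char Int), ∀ c ∈ cs, altStep bl sl st c =
      ((fun (a : Int) (c : Char) => if [c] = bl then a + 1 else a) st.1 c,
       (fun (p : Int × PySem.Dict Char Int) (c : Char) =>
         ((fun (b : Int) (c : Char) => if ¬([c] = bl) ∧ [c] = sl then b + 1 else b) p.1 c,
          (fun (d : PySem.Dict Char Int) (c : Char) => if ¬([c] = bl) ∧ ¬([c] = sl) then d.modify c 0 (· + 1) else d) p.2 c)) st.2 c) := by
    intro st c _
    simp only [altStep]
    split_ifs <;> first | rfl | simp_all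
  rw [PySem.List.foldl_congr_mem cs _ _ _ hshape]
  rw [PySem.List.foldl_prod_mk (f := fun (a : Int) (c : Char) => if [c] = bl then a + 1 else a)
      (g := fun (p : Int × PySem.Dict Char Int) (c : Char) =>
        ((fun (b : Int) (c : Char) => if ¬([c] = bl) ∧ [c] = sl then b + 1 else b) p.1 c,
         (fun (d : PySem.Dict Char Int) (c : Char) => if ¬([c] = bl) ∧ ¬([c] = sl) then d.modify c 0 (· + 1) else d) p.2 c))]
  rw [PySem.List.foldl_prod_mk (f := fun (b : Int) (c : Char) => if ¬([c] = bl) ∧ [c] = sl then b + 1 else b)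
      (g := fun (d : PySem.Dict Char Int) (c : Char) => if ¬([c] = bl) ∧ ¬([c] = sl) then d.modify c 0 (· + 1) else d)]
  rw [PySem.List.foldl_ite_add_one (p := fun c => [c] = bl)]
  rw [PySem.List.foldl_ite_add_one (p := fun c => ¬([c] = bl) ∧ [c] = sl)]
  rw [PySem.List.foldl_ite_eq_foldl_filter (p := fun c => ¬([c] = bl) ∧ ¬([c] = sl))]
  simp

-- A's indexed loop over range(N) is a loop over the prefix take N of S
theorem pvFoldPyRangeTake {β : Type} (xs : List Char) (f : β → Char → β) (init : β) (N : Int)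
    (h : N ≤ (xs.length : Int)) :
    (PySem.List.pyRange 0 N 1).foldl (fun acc i => f acc (PySem.List.pyGetD xs i ' ')) init
    = (xs.take N.toNat).foldl f init := by
  rcases (by omega : 0 ≤ N ∨ N < 0) with hn | hn
  · have hlen : (xs.take N.toNat).length = N.toNat := by
      rw [List.length_take]; omega
    have h0 := PySem.List.foldl_pyRange_zero_pyGetD (xs.take N.toNat) ' ' f init
    have hb : PySem.List.len (xs.take N.toNat) = N := by
      simp [pysem, hlen]; omega
    rw [hb] at h0
    rw [← h0]
    apply PySem.List.foldl_congr_mem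
    intro acc i hi
    rw [PySem.List.mem_pyRange_one] at hi
    rw [PySem.List.pyGetD_eq_getElem xs ' ' hi.1 (by omega),
        PySem.List.pyGetD_eq_getElem (xs.take N.toNat) ' ' hi.1 (by rw [hlen]; omega)]
    rw [List.getElem_take]
  · have hr : PySem.List.pyRange 0 N 1 = [] := by
      simp [PySem.List.pyRange]
      omega
    have ht : N.toNat = 0 := by omega
    rw [hr, ht]
    simp

theorem pvPyRangeNil (a b : Int) (hb : b ≤ a) : PySem.List.pyRange a b 1 = [] := by
  refine List.eq_nil_iff_forall_not_mem.mpr (fun x hx => ?_)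
  rw [PySem.List.mem_pyRange_one] at hx
  omega

theorem pvPyRangeAux : ∀ (n : Nat) (lo hi : Int), 0 ≤ lo → (hi - lo).toNat = n →
    PySem.List.pyRange lo hi 1 = (List.range' lo.toNat n).map (fun (k : Nat) => (k : Int)) := by
  intro n
  induction n with
  | zero =>
    intro lo hi h hn
    rw [pvPyRangeNil lo hi (by omega)]
    simp
  | succ m ih =>
    intro lo hi h hn
    rw [PySem.List.pyRange_one_cons (by omega), ih (lo + 1) hi (by omega) (by omega), List.range'_succ]
    rw [List.map_cons]
    have h1 : ((lo.toNat : Nat) : Int) = lo := Int.toNat_of_nonneg h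
    have h2 : (lo + 1).toNat = lo.toNat + 1 := by omega
    rw [h1, h2]

theorem pvPyRange (lo hi : Int) (h : 0 ≤ lo) :
    PySem.List.pyRange lo hi 1 = (List.range' lo.toNat ((hi - lo).toNat)).map (fun (k : Nat) => (k : Int)) :=
  pvPyRangeAux ((hi - lo).toNat) lo hi h rfl

-- B's run(lo, hi) is the counting-sort image
theorem pvRunEq (cnts : PySem.Dict Char Int) (rs : List Char) (lo hi : Int) (hlo : 0 ≤ lo)
    (hc : ∀ v, cnts.getD v 0 = (rs.count v : Int)) :
    ((PySem.List.pyRange lo hi 1).map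
      (fun k => PySem.List.pyRepeat [Char.ofNat k.toNat] (cnts.getD (Char.ofNat k.toNat) 0))).flatten
    = pvG (fun k => rs.count (Char.ofNat k)) lo.toNat ((hi - lo).toNat) := by
  rw [pvPyRange lo hi hlo, List.map_map, ← List.flatMap_def]
  unfold pvG
  apply List.flatMap_congr
  intro k _
  simp only [Function.comp_apply, Int.toNat_natCast]
  rw [hc, PySem.List.pyRepeat_singleton, Int.toNat_natCast]

-- ===== VERDICT (by name: the statement is the Claim_ definition above) =====
theorem pvFlattenLG (cnt : Nat → Nat) (a n : Nat) : (pvLG cnt a n).flatten = pvG cnt a n := by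
  rw [pvLG_eq, pvFlattenSingles]

theorem solve_spec : Claim_equal_solve := by
  unfold Claim_equal_solve
  intro N bomb S hDom hPre
  unfold Spec_solve solve solve_alt
  have hPre' : N ≤ (S.toList.length : Int) := by
    unfold Pre_solve at hPre
    simpa [pysem] using hPre
  have hchars : ∀ c ∈ S.toList, c.toNat < 128 := by
    have hd : pvDomStr S = true := by
      unfold Dom_solve at hDom
      simp only [Bool.and_eq_true] at hDom
      exact hDom.2
    rw [pvDomStr, List.all_eq_true] at hd
    intro c hc
    have h2 := hd c hc
    rw [pvDomChar] at h2
    simp at h2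
    omega
  dsimp only
  rw [PySem.Str.toList_lower]
  rw [pvFoldPyRangeTake S.toList (solveStep bomb.toList (PySem.Chars.lower bomb.toList)) ((0 : Int), (0 : Int), ([] : List (List Char))) N hPre']
  have hpfx : (if 0 < N then PySem.List.slice S.toList none (some N) else []) = S.toList.take N.toNat := by
    split_ifs with h
    · exact PySem.List.slice_to _ (le_of_lt h)
    · have h0 : N.toNat = 0 := by omega
      rw [h0]
      simp
  rw [hpfx]
  set cs := S.toList.take N.toNat with hcs
  rw [pvFoldA, pvFoldB]
  dsimp only
  set bl := bomb.toList with hbl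
  set sl := PySem.Chars.lower bomb.toList with hsldef
  set nbI : Int := ((cs.countP (fun c => decide ([c] = bl)) : Nat) : Int) with hnb
  set nsI : Int := ((cs.countP (fun c => decide (¬([c] = bl) ∧ [c] = sl)) : Nat) : Int) with hns
  set rs := cs.filter (fun c => decide (¬([c] = bl) ∧ ¬([c] = sl))) with hrs
  have hrs128 : ∀ c ∈ rs, c.toNat < 128 := fun c hc =>
    hchars c ((List.take_sublist _ _).subset (List.mem_of_mem_filter hc))
  have hcget : ∀ v, ((rs.foldl (fun d c => d.modify c 0 (· + 1)) PySem.Dict.empty).getD v 0) = (rs.count v : Int) := by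
    intro v
    rw [PySem.Dict.getD_foldl_modify_add_one]
    simp
  by_cases hsh : nsI ≤ 1
  · rw [if_pos hsh, if_pos hsh]
    rw [pvSorted1 rs hrs128]
    simp only [pvJoinNil, pvFlattenLG]
    simp only [pvRunEq _ rs 0 128 (by omega) hcget]
    norm_num
    simp [List.append_assoc]
  · rw [if_neg hsh, if_neg hsh]
    have hpos : 0 < cs.countP (fun c => decide (¬([c] = bl) ∧ [c] = sl)) := by omega
    obtain ⟨c0, hc0cs, hc0p⟩ := List.countP_pos_iff.mp hpos
    have hc0 : ¬([c0] = bl) ∧ [c0] = sl := by simpa using hc0p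
    have hsl : sl = [c0] := hc0.2.symm
    rw [hsl]
    simp only [List.headD_cons]
    have hc0128 : c0.toNat < 128 := hchars c0 ((List.take_sublist _ _).subset hc0cs)
    have hcnt0 : rs.count c0 = 0 := by
      rw [List.count_eq_zero]
      intro hmem
      have hf := List.of_mem_filter hmem
      simp at hf
      exact hf.2 hc0.2
    have hh1 : (((c0.toNat : Nat) : Int) + 1).toNat = c0.toNat + 1 := by omega
    have hh2 : ((128 : Int) - (((c0.toNat : Nat) : Int) + 1)).toNat = 127 - c0.toNat := by omega
    simp only [pvRunEq _ rs 0 ((c0.toNat : Nat) : Int) (by omega) hcget,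
               pvRunEq _ rs (((c0.toNat : Nat) : Int) + 1) 128 (by omega) hcget]
    simp only [Int.toNat_zero, Int.sub_zero, Int.toNat_natCast, hh1, hh2]
    simp only [PySem.List.pyRepeat_singleton]
    simp only [List.singleton_append, List.cons_append, List.nil_append]
    rw [pvSorted2 rs c0 (PySem.List.pyRepeat bl nbI ++ List.replicate (nsI - 1).toNat c0) hrs128 hc0128 hcnt0]
    rw [pvSorted3 rs c0 _ hrs128 hc0128 hcnt0]
    simp only [pvJoinNil]
    simp only [List.flatten_append, List.flatten_cons, pvFlattenLG, pvFlattenRep]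
    simp [List.append_assoc]
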